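-- pv_equiv track=rewrite | github.com/GlebMitko/aois | app/model/common.py | decimal_division_string
-- ===== SOURCE A (Python) =====
-- def decimal_division_string(dividend: int, divisor: int, digits_after_point: int = 5) -> str:
--     """Делит два целых и формирует десятичную строку с нужной точностью."""
--     if divisor == 0:
--         raise ZeroDivisionError("Деление на ноль")
--
--     sign = "-" if (dividend < 0) ^ (divisor < 0) else ""
--     dividend = abs(dividend)
--     divisor = abs(divisor)
--
--     integer_part = dividend // divisor
--     remainder = dividend % divisor
--
--     if digits_after_point <= 0:
--         return f"{sign}{integer_part}"
--
--     digits: list[str] = []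
--     for _ in range(digits_after_point):
--         remainder *= 10
--         digits.append(chr(ord("0") + (remainder // divisor)))
--         remainder %= divisor
--
--     return f"{sign}{integer_part}.{' '.join(digits).replace(' ', '')}"
-- ===== SOURCE B (Python) =====
-- def decimal_division_string(dividend: int, divisor: int, digits_after_point: int = 5) -> str:
--     if divisor == 0:
--         raise ZeroDivisionError("Деление на ноль")
--     sign = "-" if (dividend < 0) ^ (divisor < 0) else ""
--     a, b = abs(dividend), abs(divisor)
--     if digits_after_point <= 0:
--         return f"{sign}{a // b}"
--     CHUNK = 18
--     full, last = divmod(digits_after_point, CHUNK)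
--     parts = []
--     r = a % b
--     for _ in range(full):
--         q, r = divmod(r * 10 ** CHUNK, b)
--         parts.append(f"{q:018d}")
--     if last:
--         q, r = divmod(r * 10 ** last, b)
--         parts.append(f"{q:0{last}d}")
--     return f"{sign}{a // b}.{''.join(parts)}"
-- ===== Notes on version B (the rewrite author's own statement) =====
-- stated objective: faster
-- what changed: Replaces A's per-digit remainder loop (one division and one chr per digit) with base-10^18 chunked long division: one divmod plus one fixed-width zero-padded format per 18 digits, with the pieces joined at the end.
import Mathlib
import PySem

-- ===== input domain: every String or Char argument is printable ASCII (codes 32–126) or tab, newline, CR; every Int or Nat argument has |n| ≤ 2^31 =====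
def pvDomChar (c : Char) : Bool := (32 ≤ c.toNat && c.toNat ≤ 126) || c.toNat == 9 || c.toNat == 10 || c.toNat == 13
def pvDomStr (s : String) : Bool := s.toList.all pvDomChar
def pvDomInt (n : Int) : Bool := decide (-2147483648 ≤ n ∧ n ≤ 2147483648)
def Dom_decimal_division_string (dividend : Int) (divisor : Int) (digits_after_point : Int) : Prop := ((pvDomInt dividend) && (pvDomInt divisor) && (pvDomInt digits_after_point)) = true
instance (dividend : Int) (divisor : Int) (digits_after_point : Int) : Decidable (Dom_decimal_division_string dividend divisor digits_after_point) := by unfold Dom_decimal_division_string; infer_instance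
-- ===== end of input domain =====

-- B replaces A's per-digit remainder loop by base-10^18 chunked long division (one divmod and
-- one fixed-width format per 18 digits); return values agree wherever Python A returns (divisor ≠ 0).

-- ===== PORT A =====
-- literal port of A; when divisor = 0 Python raises ZeroDivisionError (excluded by Pre_), we return "".
-- ' '.join(digits).replace(' ', '') just concatenates the one-character digit strings (none is a
-- space), so digits is kept as a List Char and the final step is String.mk.
def decimal_division_string (dividend : Int) (divisor : Int) (digits_after_point : Int) : String :=
  if divisor = 0 then ""
  else
    let sign : String := if (decide (dividend < 0)) != (decide (divisor < 0)) then "-" else ""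
    let dividend' : Int := |dividend|
    let divisor' : Int := |divisor|
    let integer_part : Int := PySem.Int.floordiv dividend' divisor'
    let remainder : Int := PySem.Int.mod dividend' divisor'
    if digits_after_point ≤ 0 then sign ++ PySem.Int.toStr integer_part
    else
      let st := (PySem.List.pyRange 0 digits_after_point 1).foldl
        (fun (st : List Char × Int) _ =>
          let r := st.2 * 10
          (st.1 ++ [Char.ofNat (48 + (PySem.Int.floordiv r divisor').toNat)],
           PySem.Int.mod r divisor'))
        ([], remainder)
      sign ++ PySem.Int.toStr integer_part ++ "." ++ String.mk st.1

-- ===== PORT B =====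
-- literal port of Source B (chunked long division, 18 digits per divmod);
-- f"{q:0{w}d}" with q ≥ 0 left-pads str(q) with '0' to width w; ''.join = flatten.
def decimal_division_string_alt (dividend : Int) (divisor : Int) (digits_after_point : Int) : String :=
  if divisor = 0 then ""
  else
    let sign : String := if (decide (dividend < 0)) != (decide (divisor < 0)) then "-" else ""
    let a : Int := |dividend|
    let b : Int := |divisor|
    if digits_after_point ≤ 0 then sign ++ PySem.Int.toStr (PySem.Int.floordiv a b)
    else
      let full : Int := PySem.Int.floordiv digits_after_point 18
      let last : Int := PySem.Int.mod digits_after_point 18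
      let st := (PySem.List.pyRange 0 full 1).foldl
        (fun (st : List (List Char) × Int) _ =>
          (st.1 ++ [List.replicate (18 - (PySem.Int.toChars (PySem.Int.floordiv (st.2 * 10 ^ 18) b)).length) '0'
              ++ PySem.Int.toChars (PySem.Int.floordiv (st.2 * 10 ^ 18) b)],
           PySem.Int.mod (st.2 * 10 ^ 18) b))
        ([], PySem.Int.mod a b)
      let st2 := if last = 0 then st else
        (st.1 ++ [List.replicate (last.toNat - (PySem.Int.toChars (PySem.Int.floordiv (st.2 * 10 ^ last.toNat) b)).length) '0'
            ++ PySem.Int.toChars (PySem.Int.floordiv (st.2 * 10 ^ last.toNat) b)],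
         PySem.Int.mod (st.2 * 10 ^ last.toNat) b)
      sign ++ PySem.Int.toStr (PySem.Int.floordiv a b) ++ "." ++ String.mk st2.1.flatten

-- ===== PRECONDITION & SPEC =====
-- Pre_ excludes exactly divisor = 0, where Python A raises ZeroDivisionError.
def Pre_decimal_division_string (dividend : Int) (divisor : Int) (digits_after_point : Int) : Prop :=
  divisor ≠ 0
instance (dividend : Int) (divisor : Int) (digits_after_point : Int) : Decidable (Pre_decimal_division_string dividend divisor digits_after_point) := by unfold Pre_decimal_division_string; infer_instance

def pvWitness_decimal_division_string : Int × Int × Int := (7, 3, 3)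

def Spec_decimal_division_string (dividend : Int) (divisor : Int) (digits_after_point : Int) (out : String) : Prop := out = decimal_division_string_alt dividend divisor digits_after_point
instance (dividend : Int) (divisor : Int) (digits_after_point : Int) (out : String) : Decidable (Spec_decimal_division_string dividend divisor digits_after_point out) := by unfold Spec_decimal_division_string; infer_instance

-- ===== CLAIM (what is proved, stated in full; the proofs are below) =====
def Claim_equal_decimal_division_string : Prop := ∀ (dividend : Int) (divisor : Int) (digits_after_point : Int), Dom_decimal_division_string dividend divisor digits_after_point → Pre_decimal_division_string dividend divisor digits_after_point → Spec_decimal_division_string dividend divisor digits_after_point (decimal_division_string dividend divisor digits_after_point)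

-- ===== LEMMAS AND PROOFS =====

/-- `str(N)` digits of a natural number, most significant first. -/
def myDigits : Nat → List Char := fun n =>
  if h : n < 10 then [Nat.digitChar n]
  else myDigits (n / 10) ++ [Nat.digitChar (n % 10)]
  decreasing_by exact Nat.div_lt_self (by omega) (by omega)

/-- the exactly-`n`-digit (zero-padded) decimal expansion of `N`, most significant first. -/
def padDigits : Nat → Nat → List Char
  | 0, _ => []
  | n + 1, N => padDigits n (N / 10) ++ [Nat.digitChar (N % 10)]

theorem toDigitsCore_eq_myDigits : ∀ (f n : Nat) (l : List Char), n < f →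
    Nat.toDigitsCore 10 f n l = myDigits n ++ l := by
  intro f
  induction f with
  | zero => intro n l h; omega
  | succ f ih =>
    intro n l h
    rw [Nat.toDigitsCore]
    by_cases h10 : n / 10 = 0
    · have hn : n < 10 := by omega
      rw [if_pos h10, myDigits]
      simp [hn, Nat.mod_eq_of_lt hn]
    · have hlt : n / 10 < f := by
        have : n / 10 < n := Nat.div_lt_self (by omega) (by omega)
        omega
      rw [if_neg h10, ih _ _ hlt]
      conv_rhs => rw [myDigits]
      rw [dif_neg (show ¬ n < 10 by omega)]
      simp

theorem toChars_natCast (N : Nat) : PySem.Int.toChars (N : Int) = myDigits N := by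
  have : ¬ ((N : Int) < 0) := by omega
  simp only [PySem.Int.toChars, this, if_false, Int.toNat_natCast, Nat.toDigits]
  simpa using toDigitsCore_eq_myDigits (N + 1) N [] (by omega)

theorem padDigits_zero_val (n : Nat) : padDigits n 0 = List.replicate n '0' := by
  induction n with
  | zero => rfl
  | succ n ih => rw [padDigits, ih]; simp [List.replicate_succ' (n := n)]; rfl

theorem padDigits_eq_pad (n N : Nat) (h : N < 10 ^ (n + 1)) :
    padDigits (n + 1) N = List.replicate ((n + 1) - (myDigits N).length) '0' ++ myDigits N := by
  induction n generalizing N with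
  | zero =>
    have hN : N < 10 := by simpa using h
    rw [padDigits, Nat.mod_eq_of_lt hN]
    conv_rhs => rw [myDigits]
    rw [dif_pos hN]
    simp [padDigits]
  | succ n ih =>
    by_cases h10 : N < 10
    · have hdiv : N / 10 = 0 := Nat.div_eq_of_lt h10
      rw [padDigits, hdiv, padDigits_zero_val, Nat.mod_eq_of_lt h10]
      conv_rhs => rw [myDigits]
      rw [dif_pos h10]
      norm_num
    · have hdiv : N / 10 < 10 ^ (n + 1) := by
        rw [Nat.div_lt_iff_lt_mul (by omega)]
        calc N < 10 ^ (n + 2) := h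
        _ = 10 ^ (n + 1) * 10 := by ring
      rw [padDigits, ih _ hdiv]
      conv_rhs => rw [myDigits]
      rw [dif_neg h10]
      rw [List.length_append, List.length_cons]
      simp [List.append_assoc]

/-- the exact decimal expansion splits over digit blocks. -/
theorem padDigits_add (n : Nat) : ∀ (m N Q : Nat), Q < 10 ^ m →
    padDigits (n + m) (N * 10 ^ m + Q) = padDigits n N ++ padDigits m Q := by
  intro m
  induction m with
  | zero =>
    intro N Q hQ
    have : Q = 0 := by omega
    simp [this, padDigits]
  | succ m ih =>
    intro N Q hQ
    have h1 : N * 10 ^ (m + 1) + Q = Q + (N * 10 ^ m) * 10 := by ring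
    have hd : (N * 10 ^ (m + 1) + Q) / 10 = N * 10 ^ m + Q / 10 := by
      rw [h1, Nat.add_mul_div_right _ _ (by omega : 0 < 10)]
      omega
    have hm : (N * 10 ^ (m + 1) + Q) % 10 = Q % 10 := by
      rw [h1, Nat.add_mul_mod_self_right]
    have hQ' : Q / 10 < 10 ^ m := by
      rw [Nat.div_lt_iff_lt_mul (by omega)]
      calc Q < 10 ^ (m + 1) := hQ
      _ = 10 ^ m * 10 := by ring
    have hnm : n + (m + 1) = (n + m) + 1 := by omega
    rw [hnm, padDigits, hd, hm, ih N (Q / 10) hQ', padDigits, List.append_assoc]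

/-- a fold that ignores its list elements is an iterate of the state function. -/
theorem foldl_ignore {α σ : Type} (g : σ → σ) : ∀ (xs : List α) (s : σ),
    List.foldl (fun s _ => g s) s xs = g^[xs.length] s := by
  intro xs
  induction xs with
  | nil => intro s; rfl
  | cons x xs ih => intro s; simp [List.foldl_cons, ih, Function.iterate_succ_apply]

theorem fdiv_pos_eq (a b : Int) (hb : 0 ≤ b) : Int.fdiv a b = a / b := by
  rw [Int.fdiv_eq_ediv]; simp [hb]

theorem fmod_pos_eq (a b : Int) (hb : 0 ≤ b) : Int.fmod a b = a % b := by
  rw [Int.fmod_eq_emod]; simp [hb]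

theorem digitChar_ofNat (q : Nat) (h : q < 10) : Char.ofNat (48 + q) = Nat.digitChar q := by
  interval_cases q <;> decide

/-- invariant of A's digit loop (with the divisor `b > 0` already positive). -/
theorem loop_invariant (b : Int) (hb : 0 < b) : ∀ (n : Nat) (r : Int), 0 ≤ r → r < b →
    (fun (st : List Char × Int) =>
      (st.1 ++ [Char.ofNat (48 + (PySem.Int.floordiv (st.2 * 10) b).toNat)],
        PySem.Int.mod (st.2 * 10) b))^[n]
      (([], r) : List Char × Int)
    = (padDigits n ((r * 10 ^ n / b).toNat), r * 10 ^ n % b) := by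
  intro n
  induction n with
  | zero =>
    intro r hr0 hrb
    simp [padDigits, Int.emod_eq_of_lt hr0 hrb]
  | succ n ih =>
    intro r hr0 hrb
    rw [Function.iterate_succ_apply', ih r hr0 hrb]
    dsimp only
    set q : Int := r * 10 ^ n / b with hq
    set rn : Int := r * 10 ^ n % b with hrn
    have hrn0 : 0 ≤ rn := Int.emod_nonneg _ (by omega)
    have hrnb : rn < b := Int.emod_lt_of_pos _ hb
    have hdecomp : r * 10 ^ n = b * q + rn := (Int.ediv_add_emod _ _).symm
    have hq0 : 0 ≤ q := Int.ediv_nonneg (by positivity) (by omega)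
    have hfd : PySem.Int.floordiv (rn * 10) b = rn * 10 / b := by
      simp [PySem.Int.floordiv, fdiv_pos_eq _ _ (by omega : (0:Int) ≤ b)]
    have hfm : PySem.Int.mod (rn * 10) b = rn * 10 % b := by
      simp [PySem.Int.mod, fmod_pos_eq _ _ (by omega : (0:Int) ≤ b)]
    set q' : Int := rn * 10 / b with hq'
    have hq'0 : 0 ≤ q' := Int.ediv_nonneg (by omega) (by omega)
    have hq'10 : q' < 10 := by
      rw [hq', Int.ediv_lt_iff_lt_mul hb]; omega
    have hnext : r * 10 ^ (n + 1) = rn * 10 + (10 * q) * b := by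
      rw [pow_succ]; rw [← mul_assoc, hdecomp]; ring
    have hdiv : r * 10 ^ (n + 1) / b = 10 * q + q' := by
      rw [hnext, Int.add_mul_ediv_right _ _ (by omega : b ≠ 0), hq']
      ring
    have hmod : r * 10 ^ (n + 1) % b = rn * 10 % b := by
      rw [hnext, mul_comm ((10 : Int) * q) b, Int.add_mul_emod_self_left]
    have htn : (r * 10 ^ (n + 1) / b).toNat = 10 * q.toNat + q'.toNat := by
      rw [hdiv]; omega
    have hpd : padDigits (n + 1) ((r * 10 ^ (n + 1) / b).toNat)
        = padDigits n q.toNat ++ [Nat.digitChar q'.toNat] := by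
      rw [padDigits, htn]
      have h1 : (10 * q.toNat + q'.toNat) / 10 = q.toNat := by omega
      have h2 : (10 * q.toNat + q'.toNat) % 10 = q'.toNat := by omega
      rw [h1, h2]
    rw [hpd, hmod, hfd, hfm, hq', digitChar_ofNat q'.toNat (by omega)]

theorem pyRange_len (d : Int) (hd : 0 ≤ d) : (PySem.List.pyRange 0 d 1).length = d.toNat := by
  by_cases h : 0 < d
  · simp [PySem.List.pyRange, h]
  · have : d = 0 := by omega
    simp [this, PySem.List.pyRange]

/-- one block of B's chunked long division extends the exact expansion by `c` digits. -/
theorem chunk_step (b : Int) (hb : 0 < b) (c : Nat) (hc : 0 < c) (r0 : Int)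
    (hr0 : 0 ≤ r0) (hrb : r0 < b) (m : Nat) (chunks : List (List Char))
    (hf : chunks.flatten = padDigits m ((r0 * 10 ^ m / b).toNat)) :
    (chunks ++ [List.replicate (c - (PySem.Int.toChars (PySem.Int.floordiv ((r0 * 10 ^ m % b) * 10 ^ c) b)).length) '0'
        ++ PySem.Int.toChars (PySem.Int.floordiv ((r0 * 10 ^ m % b) * 10 ^ c) b)]).flatten
      = padDigits (m + c) ((r0 * 10 ^ (m + c) / b).toNat)
    ∧ PySem.Int.mod ((r0 * 10 ^ m % b) * 10 ^ c) b = r0 * 10 ^ (m + c) % b := by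
  set q : Int := r0 * 10 ^ m / b with hq
  set rn : Int := r0 * 10 ^ m % b with hrn
  have hrn0 : 0 ≤ rn := Int.emod_nonneg _ (by omega)
  have hrnb : rn < b := Int.emod_lt_of_pos _ hb
  have hdecomp : r0 * 10 ^ m = b * q + rn := (Int.ediv_add_emod _ _).symm
  have hq0 : 0 ≤ q := Int.ediv_nonneg (by positivity) (by omega)
  have hPc : ((10 ^ c : Nat) : Int) = (10 : Int) ^ c := by push_cast; ring
  set q' : Int := rn * 10 ^ c / b with hq'
  have hq'0 : 0 ≤ q' := Int.ediv_nonneg (by positivity) (by omega)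
  have hq'c : q' < (10 : Int) ^ c := by
    rw [hq', Int.ediv_lt_iff_lt_mul hb]
    have : rn * 10 ^ c < b * 10 ^ c := by
      apply mul_lt_mul_of_pos_right hrnb
      positivity
    calc rn * 10 ^ c < b * 10 ^ c := this
    _ = 10 ^ c * b := mul_comm _ _
  have hfd : PySem.Int.floordiv (rn * 10 ^ c) b = q' := by
    rw [PySem.Int.floordiv, fdiv_pos_eq _ _ (by omega : (0:Int) ≤ b), hq']
  have hfm : PySem.Int.mod (rn * 10 ^ c) b = rn * 10 ^ c % b := by
    rw [PySem.Int.mod, fmod_pos_eq _ _ (by omega : (0:Int) ≤ b)]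
  have hnext : r0 * 10 ^ (m + c) = rn * 10 ^ c + (q * 10 ^ c) * b := by
    rw [pow_add]; rw [← mul_assoc, hdecomp]; ring
  have hdiv : r0 * 10 ^ (m + c) / b = q * 10 ^ c + q' := by
    rw [hnext, Int.add_mul_ediv_right _ _ (by omega : b ≠ 0), hq']
    ring
  have hmod : r0 * 10 ^ (m + c) % b = rn * 10 ^ c % b := by
    rw [hnext, mul_comm (q * (10 : Int) ^ c) b, Int.add_mul_emod_self_left]
  have hq's : q' = ((q'.toNat : Nat) : Int) := (Int.toNat_of_nonneg hq'0).symm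
  have hq'cN : q'.toNat < 10 ^ c := by
    have := hq'c
    rw [← hPc] at this
    omega
  have hcastsum : q * 10 ^ c + q' = ((q.toNat * 10 ^ c + q'.toNat : Nat) : Int) := by
    push_cast
    rw [Int.toNat_of_nonneg hq0, Int.toNat_of_nonneg hq'0]
  have htn : (r0 * 10 ^ (m + c) / b).toNat = q.toNat * 10 ^ c + q'.toNat := by
    rw [hdiv, hcastsum, Int.toNat_natCast]
  have hchunk : List.replicate (c - (PySem.Int.toChars q').length) '0' ++ PySem.Int.toChars q'
      = padDigits c q'.toNat := by
    obtain ⟨c', rfl⟩ : ∃ c', c = c' + 1 := ⟨c - 1, by omega⟩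
    conv_lhs => rw [hq's, toChars_natCast]
    rw [padDigits_eq_pad _ _ hq'cN]
  constructor
  · rw [hfd, hchunk, List.flatten_append, hf, htn, padDigits_add _ _ _ _ hq'cN]
    simp
  · rw [hfm, hmod]

/-- invariant of B's 18-digit chunk loop. -/
theorem chunk_invariant (b : Int) (hb : 0 < b) (r : Int) (hr0 : 0 ≤ r) (hrb : r < b) :
    ∀ (k : Nat),
    ((fun (st : List (List Char) × Int) =>
        (st.1 ++ [List.replicate (18 - (PySem.Int.toChars (PySem.Int.floordiv (st.2 * 10 ^ 18) b)).length) '0'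
            ++ PySem.Int.toChars (PySem.Int.floordiv (st.2 * 10 ^ 18) b)],
         PySem.Int.mod (st.2 * 10 ^ 18) b))^[k]
      (([], r) : List (List Char) × Int)).1.flatten
      = padDigits (18 * k) ((r * 10 ^ (18 * k) / b).toNat)
    ∧ ((fun (st : List (List Char) × Int) =>
        (st.1 ++ [List.replicate (18 - (PySem.Int.toChars (PySem.Int.floordiv (st.2 * 10 ^ 18) b)).length) '0'
            ++ PySem.Int.toChars (PySem.Int.floordiv (st.2 * 10 ^ 18) b)],
         PySem.Int.mod (st.2 * 10 ^ 18) b))^[k]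
      (([], r) : List (List Char) × Int)).2
      = r * 10 ^ (18 * k) % b := by
  intro k
  induction k with
  | zero =>
    constructor
    · simp [padDigits]
    · simp [Int.emod_eq_of_lt hr0 hrb]
  | succ k ih =>
    obtain ⟨ih1, ih2⟩ := ih
    rw [Function.iterate_succ_apply']
    dsimp only
    rw [ih2]
    have hstep := chunk_step b hb 18 (by omega) r hr0 hrb (18 * k) _ ih1
    have h18 : 18 * k + 18 = 18 * (k + 1) := by ring
    rw [h18] at hstep
    exact hstep

-- ===== VERDICT (by name: the statement is the Claim_ definition above) =====
theorem decimal_division_string_spec : Claim_equal_decimal_division_string := by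
  intro dividend divisor d _ hpre
  unfold Spec_decimal_division_string
  unfold decimal_division_string decimal_division_string_alt
  rw [if_neg hpre, if_neg hpre]
  simp only []
  by_cases hd : d ≤ 0
  · rw [if_pos hd, if_pos hd]
  · rw [if_neg hd, if_neg hd]
    set a : Int := |dividend| with ha
    set b : Int := |divisor| with hb
    have hb0 : 0 < b := by
      rcases lt_trichotomy divisor 0 with h | h | h
      · simp [hb]; omega
      · exact absurd h hpre
      · simp [hb]; omega
    have ha0 : 0 ≤ a := abs_nonneg _
    set n : Nat := d.toNat with hn
    have hn0 : 0 < n := by omega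
    have hdn : d = (n : Int) := by omega
    clear_value a b n
    -- common pieces
    have hfm : PySem.Int.mod a b = a % b := by
      rw [PySem.Int.mod, fmod_pos_eq _ _ (by omega : (0:Int) ≤ b)]
    have hr0 : 0 ≤ a % b := Int.emod_nonneg _ (by omega)
    have hrb : a % b < b := Int.emod_lt_of_pos _ hb0
    -- A's loop
    rw [foldl_ignore, pyRange_len d (by omega), ← hn, hfm]
    rw [loop_invariant b hb0 n (a % b) hr0 hrb]
    -- B's chunk loop
    have h18c : (((18 : Nat) : Int)) = (18 : Int) := by norm_num
    have hfull : PySem.Int.floordiv d 18 = ((n / 18 : Nat) : Int) := by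
      rw [PySem.Int.floordiv, fdiv_pos_eq _ _ (by omega : (0:Int) ≤ 18), hdn,
        ← h18c, ← Int.natCast_div]
    have hlast : PySem.Int.mod d 18 = ((n % 18 : Nat) : Int) := by
      rw [PySem.Int.mod, fmod_pos_eq _ _ (by omega : (0:Int) ≤ 18), hdn,
        ← h18c, ← Int.natCast_mod]
    rw [hfull, hlast, foldl_ignore, pyRange_len _ (by positivity)]
    simp only [Int.toNat_natCast]
    obtain ⟨hinv1, hinv2⟩ := chunk_invariant b hb0 (a % b) hr0 hrb (n / 18)
    by_cases hl : n % 18 = 0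
    · rw [if_pos (show ((n % 18 : Nat) : Int) = 0 by rw [hl]; rfl)]
      rw [hinv1]
      have h18 : 18 * (n / 18) = n := by omega
      rw [h18]
    · rw [if_neg (show ¬ ((n % 18 : Nat) : Int) = 0 by exact_mod_cast hl)]
      dsimp only
      rw [hinv2]
      have hstep := chunk_step b hb0 (n % 18) (by omega) (a % b) hr0 hrb (18 * (n / 18)) _ hinv1
      have h18 : 18 * (n / 18) + n % 18 = n := by omega
      rw [h18] at hstep
      rw [hstep.1]
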